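-- pv_equiv track=rewrite | github.com/hassanmzia/AI-GovCon-System | ai_orchestrator/src/agents/competitor_sim_agent.py | _parse_scenarios
-- ===== SOURCE A (Python) =====
-- def _parse_scenarios(text: str) -> list[dict]:
--     """Parse competitive scenarios from LLM output."""
--     scenarios = []
--     scenario_names = ["AGGRESSIVE", "BALANCED", "TECHNICAL"]
--     current_name = ""
--     current_content: list[str] = []
--
--     for line in text.split("\n"):
--         upper = line.strip().upper()
--         matched = False
--         for name in scenario_names:
--             if name in upper and len(line.strip()) < 80:
--                 # Save previous scenario
--                 if current_name:
--                     scenarios.append({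
--                         "scenario": current_name.lower(),
--                         "analysis": "\n".join(current_content).strip(),
--                     })
--                 current_name = name
--                 current_content = []
--                 matched = True
--                 break
--         if not matched:
--             current_content.append(line)
--
--     # Save last scenario
--     if current_name:
--         scenarios.append({
--             "scenario": current_name.lower(),
--             "analysis": "\n".join(current_content).strip(),
--         })
--
--     # Fallback if parsing fails
--     if not scenarios:
--         scenarios.append({
--             "scenario": "combined",
--             "analysis": text,
--         })
--
--     return scenarios
-- ===== SOURCE B (Python) =====
-- def _parse_scenarios(text: str) -> list[dict]:
--     """Parse competitive scenarios from LLM output (single reverse pass,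
--     building the result back-to-front; no pending-scenario state)."""
--     names = ["AGGRESSIVE", "BALANCED", "TECHNICAL"]
--
--     def header(line):
--         s = line.strip()
--         if len(s) < 80:
--             u = s.upper()
--             for n in names:
--                 if n in u:
--                     return n
--         return None
--
--     scenarios: list[dict] = []
--     content: list[str] = []
--     for line in reversed(text.split("\n")):
--         h = header(line)
--         if h is None:
--             content.insert(0, line)
--         else:
--             scenarios.insert(0, {
--                 "scenario": h.lower(),
--                 "analysis": "\n".join(content).strip(),
--             })
--             content = []
--     if not scenarios:
--         return [{"scenario": "combined", "analysis": text}]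
--     return scenarios
-- ===== Notes on version B (the rewrite author's own statement) =====
-- stated objective: alternative
-- what changed: B replaces A's forward fold carrying a pending scenario name/content state by a single reverse pass over the lines that builds the scenario list back-to-front (a header line closes the content collected since the previous header to its right), with the header test factored into one helper.
import Mathlib
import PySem

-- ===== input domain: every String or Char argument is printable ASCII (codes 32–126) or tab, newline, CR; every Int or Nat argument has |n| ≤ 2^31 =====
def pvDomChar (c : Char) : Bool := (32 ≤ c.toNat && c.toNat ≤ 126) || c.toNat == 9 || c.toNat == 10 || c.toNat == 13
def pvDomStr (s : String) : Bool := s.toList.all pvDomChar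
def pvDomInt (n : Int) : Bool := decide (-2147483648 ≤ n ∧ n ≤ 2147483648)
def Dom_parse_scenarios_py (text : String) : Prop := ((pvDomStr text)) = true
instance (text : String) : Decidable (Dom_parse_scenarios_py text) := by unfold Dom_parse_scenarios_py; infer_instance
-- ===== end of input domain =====

-- B replaces A's forward fold with pending-scenario state by a single reverse pass that
-- builds the result back-to-front (objective: alternative; same cost).

-- text.split("\n") — sep is the nonempty literal "\n", so split? is always some
def pvLines (text : String) : List String := (PySem.Str.split? text "\n").getD []

-- shared constant: the scenario-name list both Python sources contain
def pvNames : List String := ["AGGRESSIVE", "BALANCED", "TECHNICAL"]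

-- {"scenario": name.lower(), "analysis": "\n".join(content).strip()}
def pvScenDict (name : String) (content : List String) : List (String × String) :=
  [("scenario", PySem.Str.lower name), ("analysis", PySem.Str.strip (PySem.Str.join "\n" content))]

-- ===== PORT A =====
-- one iteration of A's 'for line in text.split("\n")' loop (inner for/break = find?)
def pvStepA (st : List (List (String × String)) × String × List String) (line : String) :
    List (List (String × String)) × String × List String :=
  match pvNames.find? (fun name =>
      PySem.Str.isIn name (PySem.Str.upper (PySem.Str.strip line)) &&
        decide (PySem.Str.len (PySem.Str.strip line) < 80)) with
  | some name =>
      ((if st.2.1 ≠ "" then st.1 ++ [pvScenDict st.2.1 st.2.2] else st.1), name, [])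
  | none => (st.1, st.2.1, st.2.2 ++ [line])

def parse_scenarios_py (text : String) : List (List (String × String)) :=
  let st := (pvLines text).foldl pvStepA ([], "", [])
  let scenarios := if st.2.1 ≠ "" then st.1 ++ [pvScenDict st.2.1 st.2.2] else st.1
  if scenarios = [] then [[("scenario", "combined"), ("analysis", text)]] else scenarios

-- ===== PORT B =====
-- B's header test: length gate on the stripped line first, then the first matching name
def pvHeader (line : String) : Option String :=
  if PySem.Str.len (PySem.Str.strip line) < 80 then
    pvNames.find? (fun n => PySem.Str.isIn n (PySem.Str.upper (PySem.Str.strip line)))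
  else none

-- one iteration of B's 'for line in reversed(...)' loop; insert(0, ·) = cons
def pvStepB (line : String) (st : List (List (String × String)) × List String) :
    List (List (String × String)) × List String :=
  match pvHeader line with
  | none => (st.1, line :: st.2)
  | some h => (pvScenDict h st.2 :: st.1, [])

def parse_scenarios_py_alt (text : String) : List (List (String × String)) :=
  let st := (pvLines text).foldr pvStepB ([], [])
  if st.1 = [] then [[("scenario", "combined"), ("analysis", text)]] else st.1

-- ===== PRECONDITION & SPEC =====
def Spec_parse_scenarios_py (text : String) (out : List (List (String × String))) : Prop := out = parse_scenarios_py_alt text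
instance (text : String) (out : List (List (String × String))) : Decidable (Spec_parse_scenarios_py text out) := by unfold Spec_parse_scenarios_py; infer_instance

-- ===== CLAIM (what is proved, stated in full; the proofs are below) =====
def Claim_equal_parse_scenarios_py : Prop := ∀ (text : String), Dom_parse_scenarios_py text → Spec_parse_scenarios_py text (parse_scenarios_py text)

-- ===== LEMMAS AND PROOFS =====

-- A's inner find? computes exactly B's header test
lemma findA_eq_pvHeader (line : String) :
    pvNames.find? (fun name =>
      PySem.Str.isIn name (PySem.Str.upper (PySem.Str.strip line)) &&
        decide (PySem.Str.len (PySem.Str.strip line) < 80)) = pvHeader line := by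
  unfold pvHeader
  by_cases h : (PySem.Chars.strip line.toList).length < 80 <;>
    simp [pvNames, List.find?, h]

lemma pvHeader_ne_empty {line n : String} (h : pvHeader line = some n) : n ≠ "" := by
  unfold pvHeader at h
  split at h
  · have hm := List.mem_of_find?_eq_some h
    simp [pvNames] at hm
    rcases hm with hm | hm | hm <;> subst hm <;> decide
  · exact absurd h (by simp)

-- finishing step of A's loop
def pvFinishA (st : List (List (String × String)) × String × List String) :
    List (List (String × String)) :=
  if st.2.1 ≠ "" then st.1 ++ [pvScenDict st.2.1 st.2.2] else st.1

lemma stepB_some {line m : String} (hh : pvHeader line = some m)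
    (st : List (List (String × String)) × List String) :
    pvStepB line st = (pvScenDict m st.2 :: st.1, []) := by
  unfold pvStepB
  rw [hh]

lemma stepB_none {line : String} (hh : pvHeader line = none)
    (st : List (List (String × String)) × List String) :
    pvStepB line st = (st.1, line :: st.2) := by
  unfold pvStepB
  rw [hh]

lemma foldA_eq_foldB (lines : List String) :
    ∀ (scen : List (List (String × String))) (name : String) (content : List String),
    pvFinishA (lines.foldl pvStepA (scen, name, content)) =
      scen ++ (if name ≠ "" then
          [pvScenDict name (content ++ (lines.foldr pvStepB ([], [])).2)] else [])
        ++ (lines.foldr pvStepB ([], [])).1 := by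
  induction lines with
  | nil =>
      intro scen name content
      by_cases h : name = ""
      · rw [pvFinishA, if_neg (by simp [h])]
        simp [h]
      · rw [pvFinishA, if_pos h]
        simp [h]
  | cons l rest ih =>
      intro scen name content
      simp only [List.foldl_cons, List.foldr_cons]
      cases hh : pvHeader l with
      | some m =>
          have hstep : pvStepA (scen, name, content) l =
              ((if name ≠ "" then scen ++ [pvScenDict name content] else scen), m, []) := by
            unfold pvStepA
            rw [findA_eq_pvHeader, hh]
          rw [hstep, ih, stepB_some hh]
          rw [if_pos (pvHeader_ne_empty hh)]
          by_cases h : name = ""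
          · rw [if_neg (by simp [h]), if_neg (by simp [h])]
            simp only [List.nil_append, List.append_nil, List.append_assoc,
              List.singleton_append]
          · rw [if_pos h, if_pos h]
            simp only [List.nil_append, List.append_nil, List.append_assoc,
              List.cons_append]
      | none =>
          have hstep : pvStepA (scen, name, content) l = (scen, name, content ++ [l]) := by
            unfold pvStepA
            rw [findA_eq_pvHeader, hh]
          rw [hstep, ih, stepB_none hh]
          simp only [List.append_assoc, List.singleton_append]

-- ===== VERDICT (by name: the statement is the Claim_ definition above) =====
theorem parse_scenarios_py_spec : Claim_equal_parse_scenarios_py := by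
  intro text _
  unfold Spec_parse_scenarios_py parse_scenarios_py parse_scenarios_py_alt
  have h := foldA_eq_foldB (pvLines text) [] "" []
  simp only [pvFinishA] at h
  simp [h]
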